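-- pv_equiv track=rewrite | github.com/ajayjohn/tars-work-assistant | scripts/update-reference.py | apply_preserved_fields
-- ===== SOURCE A (Python) =====
-- def apply_preserved_fields(content, preserved):
--     """Replace field lines in content with preserved values, positionally.
--
--     Each occurrence of a prefix in the merged content is matched to the
--     corresponding preserved value by position. If the merged content has
--     more occurrences than were preserved (new sections added by plugin),
--     the extra occurrences keep the plugin's value.
--     """
--     lines = content.split("\n")
--     result = []
--     counters = {prefix: 0 for prefix in preserved}
--     for line in lines:
--         stripped = line.strip()
--         replaced = False
--         for prefix, values in preserved.items():
--             if stripped.startswith(prefix):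
--                 idx = counters[prefix]
--                 if idx < len(values):
--                     # Keep the original indentation
--                     indent = line[:len(line) - len(line.lstrip())]
--                     result.append(indent + values[idx])
--                     replaced = True
--                 counters[prefix] += 1
--                 break
--         if not replaced:
--             result.append(line)
--     return "\n".join(result)
-- ===== SOURCE B (Python) =====
-- def apply_preserved_fields(content, preserved):
--     """Two-pass variant: index matching line positions per prefix, then scatter
--     the preserved values into a copy of the lines."""
--     lines = content.split("\n")
--     positions = {prefix: [] for prefix in preserved}
--     indents = []
--     for i, line in enumerate(lines):
--         stripped = line.strip()
--         indents.append(line[:len(line) - len(line.lstrip())])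
--         for prefix in preserved:
--             if stripped.startswith(prefix):
--                 positions[prefix].append(i)
--                 break
--     result = list(lines)
--     for prefix, values in preserved.items():
--         for pos, val in zip(positions[prefix], values):
--             result[pos] = indents[pos] + val
--     return "\n".join(result)
-- ===== Notes on version B (the rewrite author's own statement) =====
-- stated objective: alternative
-- what changed: A threads per-prefix counters through one stateful pass that appends output line by line; B first builds an index (per-prefix lists of matching line positions plus all indentations) in one pass, then scatters zip(positions, values) replacements into a copy of the lines.
import Mathlib
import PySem

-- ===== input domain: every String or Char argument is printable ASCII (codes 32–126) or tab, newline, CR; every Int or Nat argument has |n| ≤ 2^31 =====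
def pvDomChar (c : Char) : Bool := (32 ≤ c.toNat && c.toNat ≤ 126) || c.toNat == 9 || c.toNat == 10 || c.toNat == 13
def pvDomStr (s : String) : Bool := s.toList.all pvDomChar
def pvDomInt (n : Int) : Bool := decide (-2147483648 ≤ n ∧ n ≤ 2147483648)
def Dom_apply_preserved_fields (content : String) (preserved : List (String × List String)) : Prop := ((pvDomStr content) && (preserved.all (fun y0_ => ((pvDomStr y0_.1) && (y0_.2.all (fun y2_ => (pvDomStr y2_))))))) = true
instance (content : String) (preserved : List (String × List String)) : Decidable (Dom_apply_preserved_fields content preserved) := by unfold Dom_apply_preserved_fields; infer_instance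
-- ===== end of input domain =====

-- B replaces A's single stateful pass (per-prefix counters threaded through the loop) by a two-pass
-- index-then-scatter decomposition (objective: alternative, same cost).

-- ===== PORT A =====
-- indent = line[:len(line) - len(line.lstrip())]  (this expression occurs verbatim in both Pythons)
def pvIndent (line : String) : String :=
  PySem.Str.slice line (some 0) (some (PySem.Str.len line - PySem.Str.len (PySem.Str.lstrip line)))

-- A's inner 'for prefix, values in preserved.items(): if stripped.startswith(prefix): … break' =
-- first item whose prefix matches the stripped line
def pvMatch (items : List (String × List String)) (line : String) : Option (String × List String) :=
  items.find? (fun pv => PySem.Str.startswith (PySem.Str.strip line) pv.1)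

-- body of A's 'for line in lines' loop; state = (result, counters)
def pvStepA (items : List (String × List String))
    (st : List String × PySem.Dict String Int) (line : String) :
    List String × PySem.Dict String Int :=
  match pvMatch items line with
  | some (pfx, values) =>
      let idx := st.2.getD pfx 0
      if idx < (values.length : Int) then
        -- counters always hold pfx (initialised over the same keys), so getD is exact;
        -- 0 ≤ idx < len(values) here, so pyGetD with a dummy default is exact
        (st.1 ++ [pvIndent line ++ PySem.List.pyGetD values idx ""], st.2.insert pfx (idx + 1))
      else
        (st.1 ++ [line], st.2.insert pfx (idx + 1))
  | none => (st.1 ++ [line], st.2)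

def apply_preserved_fields (content : String) (preserved : List (String × List String)) : String :=
  let lines := (PySem.Str.split? content "\n").getD []   -- sep "\n" ≠ "", so split? is always some
  let d := PySem.Dict.ofList preserved
  let counters : PySem.Dict String Int :=
    d.keys.foldl (fun c k => c.insert k 0) PySem.Dict.empty   -- {prefix: 0 for prefix in preserved}
  PySem.Str.join "\n" (lines.foldl (pvStepA d.items) ([], counters)).1

-- ===== PORT B =====
-- B's inner 'for prefix in preserved: if stripped.startswith(prefix): … break'
def pvMatchKey (keys : List String) (line : String) : Option String :=
  keys.find? (fun pfx => PySem.Str.startswith (PySem.Str.strip line) pfx)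

-- body of B's first pass over enumerate(lines); state = (positions, indents)
def pvStepPos (keys : List String)
    (st : PySem.Dict String (List Int) × List String) (p : Int × String) :
    PySem.Dict String (List Int) × List String :=
  let inds := st.2 ++ [pvIndent p.2]
  match pvMatchKey keys p.2 with
  | some pfx => (st.1.modify pfx [] (fun l => l ++ [p.1]), inds)
  | none => (st.1, inds)

-- body of B's scatter: result[pos] = indents[pos] + val  (0 ≤ pos < len(result) always, so
-- .toNat with List.set is exact, and pyGetD with a dummy default is exact)
def pvScatter (indents : List String) (r : List String) (q : Int × String) : List String :=
  r.set q.1.toNat (PySem.List.pyGetD indents q.1 "" ++ q.2)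

def apply_preserved_fields_alt (content : String) (preserved : List (String × List String)) : String :=
  let lines := (PySem.Str.split? content "\n").getD []
  let d := PySem.Dict.ofList preserved
  let positions0 : PySem.Dict String (List Int) :=
    d.keys.foldl (fun c k => c.insert k []) PySem.Dict.empty   -- {prefix: [] for prefix in preserved}
  let pass1 := (PySem.List.enumerate lines).foldl (pvStepPos d.keys) (positions0, [])
  let result := d.items.foldl (fun res pv =>
      (List.zip (pass1.1.getD pv.1 []) pv.2).foldl (pvScatter pass1.2) res) lines
  PySem.Str.join "\n" result

-- ===== PRECONDITION & SPEC =====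
def Spec_apply_preserved_fields (content : String) (preserved : List (String × List String)) (out : String) : Prop := out = apply_preserved_fields_alt content preserved
instance (content : String) (preserved : List (String × List String)) (out : String) : Decidable (Spec_apply_preserved_fields content preserved out) := by unfold Spec_apply_preserved_fields; infer_instance

-- ===== CLAIM (what is proved, stated in full; the proofs are below) =====
def Claim_equal_apply_preserved_fields : Prop := ∀ (content : String) (preserved : List (String × List String)), Dom_apply_preserved_fields content preserved → Spec_apply_preserved_fields content preserved (apply_preserved_fields content preserved)

-- ===== LEMMAS AND PROOFS =====

-- the key matched by a line (shared characterisation of both inner loops)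
def pvKeyOf (items : List (String × List String)) (line : String) : Option String :=
  (pvMatch items line).map (·.1)

lemma pvMatchKey_eq (items : List (String × List String)) (line : String) :
    pvMatchKey (items.map (·.1)) line = pvKeyOf items line := by
  simp [pvMatchKey, pvKeyOf, pvMatch, List.find?_map, Function.comp_def]

-- recursive characterisation of A's pass (counters as a plain function)
def pvSpecA (items : List (String × List String)) :
    List String → (String → Int) → List String
  | [], _ => []
  | l :: ls, c =>
    match pvMatch items l with
    | some (pfx, values) =>
        (if c pfx < (values.length : Int) then pvIndent l ++ PySem.List.pyGetD values (c pfx) "" else l)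
          :: pvSpecA items ls (fun q => if q = pfx then c q + 1 else c q)
    | none => l :: pvSpecA items ls c

lemma pvCtr_insert (ctr : PySem.Dict String Int) (pfx : String) :
    (fun p => (ctr.insert pfx (ctr.getD pfx 0 + 1)).getD p 0)
      = (fun q => if q = pfx then ctr.getD q 0 + 1 else ctr.getD q 0) := by
  funext q
  rw [PySem.Dict.getD_insert]
  split_ifs with hq <;> simp [hq]

lemma pvA_fold (items : List (String × List String)) :
    ∀ (lines : List String) (acc : List String) (ctr : PySem.Dict String Int),
    (lines.foldl (pvStepA items) (acc, ctr)).1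
      = acc ++ pvSpecA items lines (fun p => ctr.getD p 0) := by
  intro lines
  induction lines with
  | nil => intro acc ctr; simp [pvSpecA]
  | cons l ls ih =>
    intro acc ctr
    simp only [List.foldl_cons, pvSpecA]
    cases h : pvMatch items l with
    | none => simp [pvStepA, h, ih]
    | some pv =>
      obtain ⟨pfx, values⟩ := pv
      simp only [pvStepA, h]
      by_cases hlt : ctr.getD pfx 0 < (values.length : Int)
      · rw [if_pos hlt, if_pos hlt, ih, pvCtr_insert]
        simp
      · rw [if_neg hlt, if_neg hlt, ih, pvCtr_insert]
        simp

lemma pvGetD_foldl_insert_const {ν : Type} (v : ν) :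
    ∀ (ks : List String) (d : PySem.Dict String ν), (∀ q, d.getD q v = v) →
    ∀ q, (ks.foldl (fun c k => c.insert k v) d).getD q v = v := by
  intro ks
  induction ks with
  | nil => intro d h q; simpa using h q
  | cons k kt ih =>
    intro d h q
    simp only [List.foldl_cons]
    exact ih _ (fun q' => by
      rw [PySem.Dict.getD_insert]
      split_ifs with hq <;> simp [h]) q

-- pointwise value of A's pass: counter at step i = initial counter + matches before i
def pvCnt (items : List (String × List String)) (lines : List String) (i : Nat) (pfx : String) : Int :=
  ((lines.take i).countP (fun l' => pvKeyOf items l' == some pfx) : Int)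

def pvOut (items : List (String × List String)) (lines : List String) (c : String → Int)
    (i : Nat) (l : String) : String :=
  match pvMatch items l with
  | some (pfx, vs) =>
      if c pfx + pvCnt items lines i pfx < (vs.length : Int)
      then pvIndent l ++ PySem.List.pyGetD vs (c pfx + pvCnt items lines i pfx) "" else l
  | none => l

lemma pvSpecA_get? (items : List (String × List String)) :
    ∀ (lines : List String) (c : String → Int) (i : Nat),
    (pvSpecA items lines c)[i]? = (lines[i]?).map (pvOut items lines c i) := by
  intro lines
  induction lines with
  | nil => intro c i; simp [pvSpecA]
  | cons l ls ih =>
    intro c i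
    cases i with
    | zero =>
      cases h : pvMatch items l with
      | none => simp [pvSpecA, h, pvOut]
      | some pv =>
        obtain ⟨pfx, vs⟩ := pv
        have hc : pvCnt items (l :: ls) 0 pfx = 0 := by simp [pvCnt]
        simp [pvSpecA, h, pvOut, hc]
    | succ i =>
      have hcons : ∀ (c' : String → Int),
          (pvSpecA items (l :: ls) c')[i + 1]?
            = (pvSpecA items ls (match pvMatch items l with
                | some (pfx, _) => fun q => if q = pfx then c' q + 1 else c' q
                | none => c'))[i]? := by
        intro c'
        cases h : pvMatch items l with
        | none => simp [pvSpecA, h]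
        | some pv => obtain ⟨pfx, vs⟩ := pv; simp [pvSpecA, h]
      rw [hcons c]
      cases h : pvMatch items l with
      | none =>
        rw [ih c i]
        simp only [List.getElem?_cons_succ]
        cases hx : ls[i]? with
        | none => simp
        | some x =>
          simp only [Option.map_some]
          congr 1
          cases hm : pvMatch items x with
          | none => simp only [pvOut, hm]
          | some pv =>
            obtain ⟨p, vs⟩ := pv
            have hc : pvCnt items ls i p = pvCnt items (l :: ls) (i + 1) p := by
              have : (pvKeyOf items l == some p) = false := by simp [pvKeyOf, h]
              simp [pvCnt, this]
            simp only [pvOut, hm, hc]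
      | some pv =>
        obtain ⟨pfx, vs⟩ := pv
        rw [ih _ i]
        simp only [List.getElem?_cons_succ]
        cases hx : ls[i]? with
        | none => simp
        | some x =>
          simp only [Option.map_some]
          congr 1
          cases hm : pvMatch items x with
          | none => simp only [pvOut, hm]
          | some pv' =>
            obtain ⟨p, vs'⟩ := pv'
            have hc : (if p = pfx then c p + 1 else c p) + pvCnt items ls i p
                = c p + pvCnt items (l :: ls) (i + 1) p := by
              by_cases hp : p = pfx
              · subst hp
                have : (pvKeyOf items l == some p) = true := by simp [pvKeyOf, h]
                simp only [pvCnt, List.take_succ_cons, List.countP_cons, this]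
                push_cast; ring
              · have : (pvKeyOf items l == some p) = false := by simp [pvKeyOf, h, Ne.symm hp]
                simp only [if_neg hp, pvCnt, List.take_succ_cons, List.countP_cons, this]
                push_cast; ring
            simp only [pvOut, hm]
            rw [hc]

-- per-prefix match positions, absolute indices from s
def pvPosFrom (items : List (String × List String)) (p : String) :
    List String → Int → List Int
  | [], _ => []
  | l :: ls, s =>
      if pvKeyOf items l == some p then s :: pvPosFrom items p ls (s + 1)
      else pvPosFrom items p ls (s + 1)

lemma pvMem_posFrom (items : List (String × List String)) (p : String) :
    ∀ (lines : List String) (s j : Int), j ∈ pvPosFrom items p lines s ↔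
      ∃ i : Nat, i < lines.length ∧ j = s + i ∧ pvKeyOf items lines[i]! = some p := by
  intro lines
  induction lines with
  | nil => intro s j; simp [pvPosFrom]
  | cons l ls ih =>
    intro s j
    by_cases h : pvKeyOf items l = some p
    · simp only [pvPosFrom, h, beq_self_eq_true, if_pos, List.mem_cons, ih]
      constructor
      · rintro (rfl | ⟨i, hi, rfl, hm⟩)
        · exact ⟨0, by simp, by simp, by simpa using h⟩
        · exact ⟨i + 1, by simpa using hi, by push_cast; ring, by simpa using hm⟩
      · rintro ⟨i, hi, rfl, hm⟩
        cases i with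
        | zero => left; simp
        | succ i =>
          right
          exact ⟨i, by simpa using hi, by push_cast; ring, by simpa using hm⟩
    · rw [pvPosFrom, if_neg (by simpa using h), ih]
      constructor
      · rintro ⟨i, hi, rfl, hm⟩
        exact ⟨i + 1, by simpa using hi, by push_cast; ring, by simpa using hm⟩
      · rintro ⟨i, hi, rfl, hm⟩
        cases i with
        | zero => exact absurd (by simpa using hm) h
        | succ i =>
          exact ⟨i, by simpa using hi, by push_cast; ring, by simpa using hm⟩

lemma pvPosFrom_ge (items : List (String × List String)) (p : String) :
    ∀ (lines : List String) (s j : Int), j ∈ pvPosFrom items p lines s → s ≤ j := by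
  intro lines s j hj
  rw [pvMem_posFrom] at hj
  obtain ⟨i, _, rfl, _⟩ := hj
  omega

lemma pvPosFrom_nodup (items : List (String × List String)) (p : String) :
    ∀ (lines : List String) (s : Int), (pvPosFrom items p lines s).Nodup := by
  intro lines
  induction lines with
  | nil => intro s; simp [pvPosFrom]
  | cons l ls ih =>
    intro s
    rw [pvPosFrom]
    split_ifs
    · refine List.nodup_cons.2 ⟨fun hmem => ?_, ih (s + 1)⟩
      have := pvPosFrom_ge items p ls (s + 1) s hmem
      omega
    · exact ih (s + 1)

lemma pvFind_zip_match (items : List (String × List String)) (p : String) :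
    ∀ (lines : List String) (s : Int) (i : Nat) (vs : List String),
      i < lines.length → pvKeyOf items lines[i]! = some p →
      (List.zip (pvPosFrom items p lines s) vs).find? (fun q => q.1 == s + i)
        = (vs[(lines.take i).countP (fun l => pvKeyOf items l == some p)]?).map (fun v => (s + i, v)) := by
  intro lines
  induction lines with
  | nil => intro s i vs hi; simp at hi
  | cons l ls ih =>
    intro s i vs hi hm
    by_cases h : pvKeyOf items l = some p
    · rw [pvPosFrom, if_pos (by simpa using h)]
      cases vs with
      | nil => simp
      | cons v vt =>
        rw [List.zip_cons_cons, List.find?_cons]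
        cases i with
        | zero =>
          simp
        | succ i =>
          have hne : (s == s + (i + 1 : Nat)) = false := by simp; omega
          rw [hne]
          have hsi : s + ((i + 1 : Nat) : Int) = s + 1 + (i : Int) := by push_cast; ring
          rw [hsi, ih (s + 1) i vt (by simpa using hi) (by simpa using hm)]
          simp [h]
    · rw [pvPosFrom, if_neg (by simpa using h)]
      cases i with
      | zero => exact absurd (by simpa using hm) h
      | succ i =>
        have hsi : s + ((i + 1 : Nat) : Int) = s + 1 + (i : Int) := by push_cast; ring
        rw [hsi, ih (s + 1) i vs (by simpa using hi) (by simpa using hm)]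
        simp [h]

-- scatter at distinct in-range positions, pointwise
lemma pvScatter_get (indents : List String) :
    ∀ (pairs : List (Int × String)) (r : List String),
      (pairs.map (·.1)).Nodup →
      (∀ q ∈ pairs, 0 ≤ q.1 ∧ q.1.toNat < r.length) →
      ∀ i : Nat,
        (pairs.foldl (pvScatter indents) r)[i]?
          = match pairs.find? (fun q => q.1 == (i : Int)) with
            | some q => some (PySem.List.pyGetD indents q.1 "" ++ q.2)
            | none => r[i]? := by
  intro pairs
  induction pairs with
  | nil => intro r _ _ i; simp
  | cons q rest ih =>
    intro r hnd hlt i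
    have hq := hlt q (by simp)
    have hndr : (rest.map (·.1)).Nodup := (List.nodup_cons.1 hnd).2
    have hqn : q.1 ∉ rest.map (·.1) := (List.nodup_cons.1 hnd).1
    have hlen : (pvScatter indents r q).length = r.length := by simp [pvScatter]
    have hltr : ∀ q' ∈ rest, 0 ≤ q'.1 ∧ q'.1.toNat < (pvScatter indents r q).length := by
      intro q' hq'; rw [hlen]; exact hlt q' (by simp [hq'])
    rw [List.foldl_cons, List.find?_cons, ih (pvScatter indents r q) hndr hltr i]
    by_cases hqi : q.1 = (i : Int)
    · have : (q.1 == (i : Int)) = true := by simpa using hqi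
      rw [this]
      have hnone : rest.find? (fun q' => q'.1 == (i : Int)) = none := by
        rw [List.find?_eq_none]
        intro x hx
        simp only [beq_iff_eq]
        intro hxi
        exact hqn (by rw [← hqi] at hxi; exact hxi ▸ List.mem_map_of_mem hx)
      rw [hnone]
      have hi' : q.1.toNat = i := by omega
      rw [pvScatter, hi', List.getElem?_set_self (by omega)]
    · have : (q.1 == (i : Int)) = false := by simpa using hqi
      rw [this]
      cases hfind : rest.find? (fun q' => q'.1 == (i : Int)) with
      | some q' => rfl
      | none =>
        simp only [pvScatter]
        rw [List.getElem?_set_ne (by omega)]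

lemma pvFoldl_option_action {α β σ : Type} (h : α → Option β) (f : σ → β → σ) :
    ∀ (l : List α) (init : σ),
    l.foldl (fun acc x => (h x).elim acc (f acc)) init
      = (l.filterMap h).foldl f init := by
  intro l
  induction l with
  | nil => intro init; rfl
  | cons x t ih =>
    intro init
    cases hx : h x <;> simp [hx, ih]

-- pass-1 splits into two independent folds
lemma pvPass1_eq (keys : List String) (el : List (Int × String))
    (dc : PySem.Dict String (List Int)) (ind : List String) :
    el.foldl (pvStepPos keys) (dc, ind)
      = (el.foldl (fun acc p => match pvMatchKey keys p.2 with
            | some pfx => acc.modify pfx [] (fun l => l ++ [p.1])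
            | none => acc) dc,
         el.foldl (fun acc p => acc ++ [pvIndent p.2]) ind) := by
  have hstep : pvStepPos keys = fun st p =>
      ((fun acc (p : Int × String) => match pvMatchKey keys p.2 with
          | some pfx => PySem.Dict.modify acc pfx [] (fun l => l ++ [p.1])
          | none => acc) st.1 p,
       (fun acc (p : Int × String) => acc ++ [pvIndent p.2]) st.2 p) := by
    funext st p
    cases h : pvMatchKey keys p.2 <;> simp [pvStepPos, h]
  rw [hstep]
  exact PySem.List.foldl_prod_mk
    (f := fun acc (p : Int × String) => match pvMatchKey keys p.2 with
      | some pfx => PySem.Dict.modify acc pfx [] (fun l => l ++ [p.1])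
      | none => acc)
    (g := fun acc (p : Int × String) => acc ++ [pvIndent p.2]) el dc ind

lemma pvEnum_map_snd {β : Type} (g : String → β) :
    ∀ (lines : List String) (s : Int),
    (PySem.List.enumerate lines s).map (fun p => g p.2) = lines.map g := by
  intro lines
  induction lines with
  | nil => intro s; simp [PySem.List.enumerate]
  | cons l ls ih => intro s; simp [PySem.List.enumerate, ih]

lemma pvFilterMap_filter (items : List (String × List String)) (p : String) :
    ∀ (lines : List String) (s : Int),
    (((PySem.List.enumerate lines s).filterMap
        (fun q => (pvMatchKey (items.map (·.1)) q.2).map (fun pfx => (pfx, q.1)))).filter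
      (fun pr => pr.1 == p)).map (·.2) = pvPosFrom items p lines s := by
  intro lines
  induction lines with
  | nil => intro s; simp [PySem.List.enumerate, pvPosFrom]
  | cons l ls ih =>
    intro s
    rw [PySem.List.enumerate]
    cases hk : pvKeyOf items l with
    | none =>
      have : pvMatchKey (items.map (·.1)) l = none := by rw [pvMatchKey_eq, hk]
      rw [pvPosFrom]
      have hne : (pvKeyOf items l == some p) = false := by simp [hk]
      rw [hne]
      simp only [List.filterMap_cons, this, Option.map_none]
      exact ih (s + 1)
    | some pfx =>
      have : pvMatchKey (items.map (·.1)) l = some pfx := by rw [pvMatchKey_eq, hk]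
      rw [pvPosFrom]
      simp only [List.filterMap_cons, this, Option.map_some, List.filter_cons]
      by_cases hp : pfx = p
      · subst hp
        have h1 : (pvKeyOf items l == some pfx) = true := by simp [hk]
        rw [h1]
        simp only [beq_self_eq_true, if_pos, List.map_cons]
        rw [ih (s + 1)]
      · have h1 : (pvKeyOf items l == some p) = false := by simp [hk, hp]
        rw [h1]
        have h2 : ((pfx, s).1 == p) = false := by simpa using hp
        rw [h2]
        simp only [Bool.false_eq_true, if_false]
        exact ih (s + 1)

lemma pvZip_map_fst_sublist {α β : Type} : ∀ (as : List α) (bs : List β),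
    ((List.zip as bs).map Prod.fst).Sublist as := by
  intro as
  induction as with
  | nil => intro bs; simp
  | cons a at' ih =>
    intro bs
    cases bs with
    | nil => simp
    | cons b bt => simpa using List.Sublist.cons₂ a (ih bt)

-- all scatter pairs of B, per item entry
def pvPairs (items : List (String × List String)) (lines : List String) : List (Int × String) :=
  items.flatMap (fun pv => List.zip (pvPosFrom items pv.1 lines 0) pv.2)

lemma pvPairs_bounds (items : List (String × List String)) (lines : List String) :
    ∀ q ∈ pvPairs items lines, 0 ≤ q.1 ∧ q.1.toNat < lines.length := by
  intro q hq
  rw [pvPairs, List.mem_flatMap] at hq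
  obtain ⟨pv, _, hz⟩ := hq
  have h1 : q.1 ∈ pvPosFrom items pv.1 lines 0 := List.of_mem_zip hz |>.1
  rw [pvMem_posFrom] at h1
  obtain ⟨i, hi, he, _⟩ := h1
  constructor <;> omega

lemma pvPairs_nodup (items : List (String × List String)) (lines : List String) :
    ∀ its : List (String × List String), its ⊆ items → (its.map (·.1)).Nodup →
    ((its.flatMap (fun pv => List.zip (pvPosFrom items pv.1 lines 0) pv.2)).map (·.1)).Nodup := by
  intro its
  induction its with
  | nil => intro _ _; simp
  | cons pv rest ih =>
    intro hsub hnd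
    rw [List.flatMap_cons, List.map_append]
    rw [List.nodup_append]
    refine ⟨(pvPosFrom_nodup items pv.1 lines 0).sublist (pvZip_map_fst_sublist _ _),
      ih (fun x hx => hsub (List.mem_cons_of_mem _ hx)) (List.nodup_cons.1 hnd).2, ?_⟩
    intro x hx x' hx' hxx
    subst hxx
    rw [List.mem_map] at hx hx'
    obtain ⟨qz, hqz, rfl⟩ := hx
    obtain ⟨qz', hqz', hq⟩ := hx'
    rw [List.mem_flatMap] at hqz'
    obtain ⟨pv', hpv', hz'⟩ := hqz'
    have h1 : qz.1 ∈ pvPosFrom items pv.1 lines 0 := (List.of_mem_zip hqz).1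
    have h2 : qz'.1 ∈ pvPosFrom items pv'.1 lines 0 := (List.of_mem_zip hz').1
    rw [pvMem_posFrom] at h1 h2
    obtain ⟨i, hi, he, hk⟩ := h1
    obtain ⟨i', hi', he', hk'⟩ := h2
    have : i = i' := by omega
    subst this
    rw [hk] at hk'
    have hpeq : pv.1 = pv'.1 := by injection hk'
    have hm : pv'.1 ∈ rest.map (·.1) := List.mem_map_of_mem hpv'
    rw [← hpeq] at hm
    exact (List.nodup_cons.1 hnd).1 hm

lemma pvFind_pairs_none (items : List (String × List String)) (lines : List String)
    (i : Nat) :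
    ∀ its : List (String × List String),
      (∀ pv ∈ its, pvKeyOf items lines[i]! ≠ some pv.1) →
      (its.flatMap (fun pv => List.zip (pvPosFrom items pv.1 lines 0) pv.2)).find?
        (fun q => q.1 == (i : Int)) = none := by
  intro its hne
  rw [List.find?_eq_none]
  intro q hq
  rw [List.mem_flatMap] at hq
  obtain ⟨pv, hpv, hz⟩ := hq
  have h1 : q.1 ∈ pvPosFrom items pv.1 lines 0 := (List.of_mem_zip hz).1
  rw [pvMem_posFrom] at h1
  obtain ⟨i', hi', he, hk⟩ := h1
  simp only [beq_iff_eq]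
  intro hqi
  have : i' = i := by omega
  subst this
  exact hne pv hpv hk

lemma pvFind_pairs (items : List (String × List String)) (lines : List String)
    (i : Nat) (hi : i < lines.length) (p : String) (vs : List String)
    (hk : pvKeyOf items lines[i]! = some p) :
    ∀ its : List (String × List String), (its.map (·.1)).Nodup → (p, vs) ∈ its →
      (its.flatMap (fun pv => List.zip (pvPosFrom items pv.1 lines 0) pv.2)).find?
          (fun q => q.1 == (i : Int))
        = (vs[(lines.take i).countP (fun l => pvKeyOf items l == some p)]?).map
            (fun v => ((i : Int), v)) := by
  intro its
  induction its with
  | nil => intro _ h; simp at h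
  | cons pv rest ih =>
    intro hnd hmem
    rw [List.flatMap_cons, List.find?_append]
    rcases List.mem_cons.1 hmem with heq | hmem'
    · subst heq
      have h0 : (0 : Int) + (i : Nat) = (i : Int) := by simp
      have := pvFind_zip_match items p lines 0 i vs hi hk
      rw [h0] at this
      rw [this]
      cases hv : vs[(lines.take i).countP (fun l => pvKeyOf items l == some p)]? with
      | some v => simp
      | none =>
        simp only [Option.map_none, Option.none_or]
        exact pvFind_pairs_none items lines i rest (by
          intro pv' hpv' hk'
          rw [hk] at hk'
          have hpp : p = pv'.1 := by injection hk'
          have hm : pv'.1 ∈ rest.map (·.1) := List.mem_map_of_mem hpv'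
          rw [← hpp] at hm
          exact (List.nodup_cons.1 hnd).1 hm)
    · have hpne : (p, vs).1 ≠ pv.1 := by
        intro h
        have hm : (p, vs).1 ∈ rest.map (·.1) := List.mem_map_of_mem hmem'
        rw [h] at hm
        exact (List.nodup_cons.1 hnd).1 hm
      have hz : (List.zip (pvPosFrom items pv.1 lines 0) pv.2).find?
          (fun q => q.1 == (i : Int)) = none := by
        have := pvFind_pairs_none items lines i [pv] (by
          intro pv' hpv' hk'
          rw [List.mem_singleton] at hpv'
          subst hpv'
          rw [hk] at hk'
          exact hpne (by injection hk'))
        simpa using this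
      rw [hz, Option.none_or]
      exact ih (List.nodup_cons.1 hnd).2 hmem'

-- nested per-item scatter is a single fold over all pairs
lemma pvFoldl_nested {α β σ : Type} (g : α → List β) (f : σ → β → σ) :
    ∀ (its : List α) (init : σ),
    its.foldl (fun acc x => (g x).foldl f acc) init = (its.flatMap g).foldl f init := by
  intro its
  induction its with
  | nil => intro init; rfl
  | cons x t ih => intro init; simp [List.flatMap_cons, List.foldl_append, ih]

-- ===== VERDICT (by name: the statement is the Claim_ definition above) =====
theorem apply_preserved_fields_spec : Claim_equal_apply_preserved_fields := by
  intro content preserved _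
  unfold Spec_apply_preserved_fields apply_preserved_fields apply_preserved_fields_alt
  dsimp only
  set lines := (PySem.Str.split? content "\n").getD [] with hlines
  set d := PySem.Dict.ofList preserved with hd
  set items := d.items with hitems
  have hkeys : d.keys = items.map (·.1) := rfl
  have hnd : (items.map (·.1)).Nodup := by
    rw [← hkeys]; exact PySem.Dict.nodup_keys_ofList preserved
  -- A side
  rw [pvA_fold items lines [] _]
  have hc0 : (fun p => (d.keys.foldl (fun c k => c.insert k (0 : Int)) PySem.Dict.empty).getD p 0)
      = (fun _ => (0 : Int)) := by
    funext p
    exact pvGetD_foldl_insert_const 0 d.keys PySem.Dict.empty (by simp) p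
  rw [hc0, List.nil_append]
  -- B side
  rw [pvPass1_eq]
  have hindents : (PySem.List.enumerate lines).foldl
      (fun acc (p : Int × String) => acc ++ [pvIndent p.2]) ([] : List String)
      = lines.map pvIndent := by
    rw [PySem.List.foldl_append_singleton_eq_map (f := fun p : Int × String => pvIndent p.2)]
    rw [List.nil_append, pvEnum_map_snd]
  have hpos : ∀ p : String,
      ((PySem.List.enumerate lines).foldl (fun acc q => match pvMatchKey d.keys q.2 with
          | some pfx => PySem.Dict.modify acc pfx [] (fun l => l ++ [q.1])
          | none => acc)
        (d.keys.foldl (fun c k => c.insert k ([] : List Int)) PySem.Dict.empty)).getD p []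
      = pvPosFrom items p lines 0 := by
    intro p
    have hbody : (fun (acc : PySem.Dict String (List Int)) (q : Int × String) =>
        match pvMatchKey d.keys q.2 with
        | some pfx => PySem.Dict.modify acc pfx [] (fun l => l ++ [q.1])
        | none => acc)
        = (fun acc q => ((pvMatchKey d.keys q.2).map (fun pfx => (pfx, q.1))).elim acc
            (fun pr => PySem.Dict.modify acc pr.1 [] (fun l => l ++ [pr.2]))) := by
      funext acc q
      cases h : pvMatchKey d.keys q.2 <;> simp
    rw [hbody]
    have hoa := pvFoldl_option_action
      (fun q : Int × String => (pvMatchKey d.keys q.2).map (fun pfx => (pfx, q.1)))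
      (fun acc pr => PySem.Dict.modify acc pr.1 [] (fun l => l ++ [pr.2]))
      (PySem.List.enumerate lines)
      (d.keys.foldl (fun c k => c.insert k ([] : List Int)) PySem.Dict.empty)
    rw [hoa, PySem.Dict.getD_foldl_modify_append]
    rw [pvGetD_foldl_insert_const ([] : List Int) d.keys PySem.Dict.empty (by simp) p,
      List.nil_append]
    rw [hkeys]
    exact pvFilterMap_filter items p lines 0
  simp only [hindents]
  have hresult : items.foldl (fun res pv =>
      (List.zip (((PySem.List.enumerate lines).foldl (fun acc q => match pvMatchKey d.keys q.2 with
          | some pfx => PySem.Dict.modify acc pfx [] (fun l => l ++ [q.1])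
          | none => acc)
        (d.keys.foldl (fun c k => c.insert k ([] : List Int)) PySem.Dict.empty)).getD pv.1 []) pv.2).foldl
        (pvScatter (lines.map pvIndent)) res) lines
      = (pvPairs items lines).foldl (pvScatter (lines.map pvIndent)) lines := by
    have hfun : (fun (res : List String) (pv : String × List String) =>
        (List.zip (((PySem.List.enumerate lines).foldl (fun acc q => match pvMatchKey d.keys q.2 with
            | some pfx => PySem.Dict.modify acc pfx [] (fun l => l ++ [q.1])
            | none => acc)
          (d.keys.foldl (fun c k => c.insert k ([] : List Int)) PySem.Dict.empty)).getD pv.1 []) pv.2).foldl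
          (pvScatter (lines.map pvIndent)) res)
        = (fun res pv => (List.zip (pvPosFrom items pv.1 lines 0) pv.2).foldl
            (pvScatter (lines.map pvIndent)) res) := by
      funext res pv
      rw [hpos pv.1]
    rw [hfun]
    exact pvFoldl_nested (fun pv : String × List String =>
      List.zip (pvPosFrom items pv.1 lines 0) pv.2) (pvScatter (lines.map pvIndent)) items lines
  rw [hresult]
  -- pointwise comparison
  congr 1
  apply List.ext_getElem?
  intro i
  rw [pvSpecA_get? items lines (fun _ => 0) i,
    pvScatter_get (lines.map pvIndent) (pvPairs items lines) lines
      (pvPairs_nodup items lines items (fun x hx => hx) hnd)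
      (pvPairs_bounds items lines) i]
  cases hlin : lines[i]? with
  | none =>
    have hile : lines.length ≤ i := List.getElem?_eq_none_iff.1 hlin
    cases hfind : (pvPairs items lines).find? (fun q => q.1 == (i : Int)) with
    | none => simp
    | some q =>
      have hqm := List.mem_of_find?_eq_some hfind
      have hqb := pvPairs_bounds items lines q hqm
      have hqe := List.find?_some hfind
      simp only [beq_iff_eq] at hqe
      omega
  | some l =>
    have hi : i < lines.length := by
      obtain ⟨h, -⟩ := List.getElem?_eq_some_iff.1 hlin
      exact h
    have hieq : lines[i]! = l := by
      rw [List.getElem!_eq_getElem?_getD, hlin]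
      rfl
    cases hk : pvKeyOf items lines[i]! with
    | none =>
      have hmn : pvMatch items lines[i]! = none := by
        unfold pvKeyOf at hk
        exact Option.map_eq_none_iff.1 hk
      have hfind : (pvPairs items lines).find? (fun q => q.1 == (i : Int)) = none := by
        rw [pvPairs]
        exact pvFind_pairs_none items lines i items (by rw [hk]; intro pv _ h; simp at h)
      rw [hfind]
      show some (pvOut items lines (fun _ => 0) i l) = some l
      rw [← hieq]
      simp only [pvOut, hmn]
    | some p =>
      obtain ⟨⟨p', vs⟩, hm, hp⟩ : ∃ pv, pvMatch items lines[i]! = some pv ∧ pv.1 = p := by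
        unfold pvKeyOf at hk
        cases hmm : pvMatch items lines[i]! with
        | none => rw [hmm] at hk; simp at hk
        | some pv =>
          rw [hmm] at hk
          exact ⟨pv, rfl, by injection hk⟩
      simp only at hp
      subst hp
      have hmem : (p', vs) ∈ items := List.mem_of_find?_eq_some hm
      rw [pvPairs, pvFind_pairs items lines i hi p' vs hk items hnd hmem]
      set r0 := (lines.take i).countP (fun l => pvKeyOf items l == some p') with hr0
      cases hv : vs[r0]? with
      | none =>
        have hge : vs.length ≤ r0 := List.getElem?_eq_none_iff.1 hv
        show some (pvOut items lines (fun _ => 0) i l) = some l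
        rw [← hieq]
        simp only [pvOut, hm]
        rw [if_neg (by simp only [pvCnt, ← hr0]; omega)]
      | some v =>
        have hlt : r0 < vs.length := by
          obtain ⟨h, -⟩ := List.getElem?_eq_some_iff.1 hv
          exact h
        show some (pvOut items lines (fun _ => 0) i l)
            = some (PySem.List.pyGetD (lines.map pvIndent) ((i : Nat) : Int) "" ++ v)
        rw [← hieq]
        simp only [pvOut, hm]
        rw [if_pos (by simp only [pvCnt, ← hr0]; omega)]
        have hidx : (0 : Int) + pvCnt items lines i p' = ((r0 : Nat) : Int) := by
          simp [pvCnt, ← hr0]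
        rw [hidx, PySem.List.pyGetD_natCast, PySem.List.pyGetD_natCast]
        have hvv : vs.getD r0 "" = v := by
          rw [List.getD_eq_getElem?_getD, hv]
          rfl
        have hindv : (lines.map pvIndent).getD i "" = pvIndent lines[i]! := by
          rw [List.getD_eq_getElem?_getD, List.getElem?_map, hlin]
          rw [hieq]
          rfl
        rw [hvv, hindv]
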